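-- pv_equiv track=rewrite | github.com/danish17/algoexpert_questions | Easy/MaxSpendCoins.py | maxSpend
-- ===== SOURCE A (Python) =====
-- def maxSpend(coin_vals, num_coins, num_child, max_each):
--     childIdx = 0
--     coinIdx = 0
--     coin_vals = sorted(coin_vals, reverse=True)
--     spent = 0
--     while childIdx < num_child:
--         coins_used = 0
--         while coins_used < max_each and childIdx < num_child:
--             spent += coin_vals[coinIdx]
--             coins_used += 1
--             childIdx += 1
--         coinIdx += 1
--     return spent
-- ===== SOURCE B (Python) =====
-- def maxSpend(coin_vals, num_coins, num_child, max_each):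
--     if num_child <= 0:
--         return 0
--     vals = sorted(coin_vals, reverse=True)
--     full = num_child // max_each
--     rem = num_child % max_each
--     spent = max_each * sum(vals[:full])
--     if rem != 0:
--         spent += rem * vals[full]
--     return spent
-- ===== Notes on version B (the rewrite author's own statement) =====
-- stated objective: alternative
-- what changed: Replaces A's per-child nested while loops with a closed form: sort descending, then full-block count num_child//max_each times the block prefix sum plus one remainder term, so no loop over children remains.
import Mathlib
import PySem

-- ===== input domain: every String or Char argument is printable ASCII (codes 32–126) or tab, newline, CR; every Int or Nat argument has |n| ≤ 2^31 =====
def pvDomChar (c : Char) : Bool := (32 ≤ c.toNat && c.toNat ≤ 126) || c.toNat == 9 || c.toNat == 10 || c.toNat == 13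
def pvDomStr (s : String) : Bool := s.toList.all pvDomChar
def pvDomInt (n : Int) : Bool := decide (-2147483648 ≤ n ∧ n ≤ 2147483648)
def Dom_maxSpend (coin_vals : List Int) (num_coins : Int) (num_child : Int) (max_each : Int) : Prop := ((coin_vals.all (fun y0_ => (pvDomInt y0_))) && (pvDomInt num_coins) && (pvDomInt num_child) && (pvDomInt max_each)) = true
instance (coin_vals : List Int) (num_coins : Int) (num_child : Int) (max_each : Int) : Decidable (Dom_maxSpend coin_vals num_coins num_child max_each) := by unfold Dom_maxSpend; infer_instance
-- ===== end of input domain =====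

-- B replaces A's per-child nested while loops with a closed form over blocks (num_child // max_each and the remainder); same measured cost (sorting dominates).

-- ===== PORT A =====
-- inner 'while coins_used < max_each and childIdx < num_child' loop; fuel = max_each.toNat bounds it exactly
def maxSpendInner (vals : List Int) (coinIdx max_each num_child : Int) :
    Nat → Int → Int → Int → Int × Int
  | 0, _, childIdx, spent => (spent, childIdx)
  | fuel+1, coins_used, childIdx, spent =>
    if coins_used < max_each ∧ childIdx < num_child then
      maxSpendInner vals coinIdx max_each num_child fuel (coins_used + 1) (childIdx + 1)
        (spent + ((PySem.List.pyGet? vals coinIdx).getD 0))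
    else (spent, childIdx)

-- outer 'while childIdx < num_child' loop; fuel num_child.toNat + 1 suffices whenever the Python terminates
def maxSpendOuter (vals : List Int) (max_each num_child : Int) :
    Nat → Int → Int → Int → Int
  | 0, _, _, spent => spent
  | fuel+1, childIdx, coinIdx, spent =>
    if childIdx < num_child then
      let p := maxSpendInner vals coinIdx max_each num_child max_each.toNat 0 childIdx spent
      maxSpendOuter vals max_each num_child fuel p.2 (coinIdx + 1) p.1
    else spent

def maxSpend (coin_vals : List Int) (num_coins : Int) (num_child : Int) (max_each : Int) : Int :=
  maxSpendOuter (PySem.List.sorted coin_vals (fun x => x) true) max_each num_child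
    (num_child.toNat + 1) 0 0 0

-- ===== PORT B =====
def maxSpend_alt (coin_vals : List Int) (num_coins : Int) (num_child : Int) (max_each : Int) : Int :=
  if num_child ≤ 0 then 0
  else
    let vals := PySem.List.sorted coin_vals (fun x => x) true
    let full := PySem.Int.floordiv num_child max_each
    let rem := PySem.Int.mod num_child max_each
    let spent := max_each * (PySem.List.slice vals none (some full)).sum
    if rem ≠ 0 then spent + rem * ((PySem.List.pyGet? vals full).getD 0) else spent

-- ===== PRECONDITION & SPEC =====
-- Pre_ excludes exactly the inputs where Python A does not return: with num_child > 0, A loops forever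
-- when max_each < 1, and raises IndexError when the number of blocks ceil(num_child/max_each) exceeds len(coin_vals).
def Pre_maxSpend (coin_vals : List Int) (num_coins : Int) (num_child : Int) (max_each : Int) : Prop :=
  num_child ≤ 0 ∨
    (1 ≤ max_each ∧ (num_child + max_each - 1) / max_each ≤ (coin_vals.length : Int))
instance (coin_vals : List Int) (num_coins : Int) (num_child : Int) (max_each : Int) : Decidable (Pre_maxSpend coin_vals num_coins num_child max_each) := by unfold Pre_maxSpend; infer_instance

def pvWitness_maxSpend : List Int × Int × Int × Int := ([5, 3, 2], 3, 5, 2)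

def Spec_maxSpend (coin_vals : List Int) (num_coins : Int) (num_child : Int) (max_each : Int) (out : Int) : Prop := out = maxSpend_alt coin_vals num_coins num_child max_each
instance (coin_vals : List Int) (num_coins : Int) (num_child : Int) (max_each : Int) (out : Int) : Decidable (Spec_maxSpend coin_vals num_coins num_child max_each out) := by unfold Spec_maxSpend; infer_instance

-- ===== CLAIM (what is proved, stated in full; the proofs are below) =====
def Claim_equal_maxSpend : Prop := ∀ (coin_vals : List Int) (num_coins : Int) (num_child : Int) (max_each : Int), Dom_maxSpend coin_vals num_coins num_child max_each → Pre_maxSpend coin_vals num_coins num_child max_each → Spec_maxSpend coin_vals num_coins num_child max_each (maxSpend coin_vals num_coins num_child max_each)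

-- ===== LEMMAS AND PROOFS =====

-- sum of vals[i], vals[i+1], …, vals[i+q-1] (missing entries count 0)
def pvS (vals : List Int) : Int → Nat → Int
  | _, 0 => 0
  | i, q+1 => (PySem.List.pyGet? vals i).getD 0 + pvS vals (i + 1) q

-- reference form of the remaining outer loop: blocks of size min max_each (num_child - childIdx)
def pvG (vals : List Int) (m n : Int) : Nat → Int → Int → Int
  | 0, _, _ => 0
  | k+1, c, i =>
    if c < n then
      (min m (n - c)) * ((PySem.List.pyGet? vals i).getD 0) + pvG vals m n k (c + min m (n - c)) (i + 1)
    else 0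

theorem pvG_of_le {vals : List Int} {m n c i : Int} (f : Nat) (h : n ≤ c) :
    pvG vals m n f c i = 0 := by
  cases f with
  | zero => rfl
  | succ k => simp [pvG]; omega

theorem inner_eq (vals : List Int) (cI m n : Int) :
    ∀ (f : Nat) (u c s : Int),
      maxSpendInner vals cI m n f u c s =
        (s + (max 0 (min (min (m - u) (n - c)) (f : Int))) * ((PySem.List.pyGet? vals cI).getD 0),
         c + max 0 (min (min (m - u) (n - c)) (f : Int))) := by
  intro f
  induction f with
  | zero => intro u c s; simp [maxSpendInner]
  | succ k ih =>
    intro u c s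
    by_cases h : u < m ∧ c < n
    · rw [maxSpendInner, if_pos h, ih]
      have ht : max 0 (min (min (m - (u+1)) (n - (c+1))) (k : Int))
          = max 0 (min (min (m - u) (n - c)) ((k+1 : Nat) : Int)) - 1 := by
        push_cast; omega
      rw [ht]
      simp only [Prod.mk.injEq]
      constructor
      · ring
      · omega
    · rw [maxSpendInner, if_neg h]
      have ht : max 0 (min (min (m - u) (n - c)) ((k+1 : Nat) : Int)) = 0 := by
        push_cast; omega
      rw [ht]; simp

theorem outer_eq (vals : List Int) (m n : Int) (hm : 1 ≤ m) :
    ∀ (f : Nat) (c i s : Int), n - c ≤ (f : Int) →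
      maxSpendOuter vals m n f c i s = s + pvG vals m n f c i := by
  intro f
  induction f with
  | zero => intro c i s hf; simp at hf; simp [maxSpendOuter, pvG]
  | succ k ih =>
    intro c i s hf
    by_cases h : c < n
    · rw [maxSpendOuter, if_pos h]
      simp only [inner_eq]
      have hmnat : (m.toNat : Int) = m := by omega
      have ht : max 0 (min (min (m - 0) (n - c)) (m.toNat : Int)) = min m (n - c) := by
        rw [hmnat]; omega
      rw [ht]
      have h1 : (1 : Int) ≤ min m (n - c) := by omega
      rw [ih (c + min m (n - c)) (i + 1) _ (by push_cast at hf ⊢; omega)]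
      rw [pvG, if_pos h]
      ring
    · rw [maxSpendOuter, if_neg h, pvG, if_neg h]; ring

theorem pvG_closed (vals : List Int) (m n : Int) (hm : 1 ≤ m) :
    ∀ (q : Nat) (f : Nat) (c i r : Int), n - c = (q : Int) * m + r → 0 ≤ r → r < m →
      q + 1 ≤ f →
      pvG vals m n f c i = m * pvS vals i q + r * ((PySem.List.pyGet? vals (i + (q : Int))).getD 0) := by
  intro q
  induction q with
  | zero =>
    intro f c i r hnc hr0 hrm hf
    simp only [Nat.cast_zero, zero_mul, zero_add] at hnc
    by_cases hr : r = 0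
    · subst hr
      rw [pvG_of_le f (by omega)]
      simp [pvS]
    · obtain ⟨k, rfl⟩ : ∃ k, f = k + 1 := ⟨f - 1, by omega⟩
      rw [pvG, if_pos (by omega)]
      have ht : min m (n - c) = r := by omega
      rw [ht, pvG_of_le k (by omega)]
      simp [pvS]
  | succ q ih =>
    intro f c i r hnc hr0 hrm hf
    have hq0 : (0 : Int) ≤ (q : Int) * m := mul_nonneg (by positivity) (by omega)
    push_cast at hnc
    rw [add_mul, one_mul] at hnc
    obtain ⟨k, rfl⟩ : ∃ k, f = k + 1 := ⟨f - 1, by omega⟩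
    rw [pvG, if_pos (by omega)]
    have ht : min m (n - c) = m := by omega
    rw [ht, ih k (c + m) (i + 1) r (by omega) hr0 hrm (by omega)]
    rw [pvS]
    have hidx : i + 1 + (q : Int) = i + ((q : Int) + 1) := by ring
    rw [hidx]
    push_cast
    ring

theorem pvS_eq_sum_take (q : Nat) : ∀ (vals : List Int) (i : Nat),
    pvS vals (i : Int) q = ((vals.drop i).take q).sum := by
  induction q with
  | zero => intro vals i; simp [pvS]
  | succ q ih =>
    intro vals i
    rw [pvS]
    have h1 : (i : Int) + 1 = ((i + 1 : Nat) : Int) := by push_cast; ring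
    rw [h1, ih vals (i + 1)]
    by_cases hi : i < vals.length
    · rw [show List.drop i vals = vals[i] :: List.drop (i + 1) vals from List.drop_eq_getElem_cons hi,
        List.take_succ_cons, List.sum_cons]
      simp [PySem.List.pyGet?_natCast, List.getElem?_eq_getElem hi]
    · have h2 : vals.drop i = [] := List.drop_eq_nil_of_le (by omega)
      have h3 : vals.drop (i + 1) = [] := List.drop_eq_nil_of_le (by omega)
      simp [h2, h3, PySem.List.pyGet?_natCast, List.getElem?_eq_none (by omega : vals.length ≤ i)]

-- ===== VERDICT (by name: the statement is the Claim_ definition above) =====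
theorem maxSpend_spec : Claim_equal_maxSpend := by
  intro coin_vals num_coins num_child max_each hdom hpre
  unfold Spec_maxSpend maxSpend maxSpend_alt
  by_cases hn : num_child ≤ 0
  · rw [if_pos hn]
    have : ¬ (0 : Int) < num_child := by omega
    rw [maxSpendOuter, if_neg this]
  · rw [if_neg hn]
    have hm : 1 ≤ max_each := (hpre.resolve_left hn).1
    set vals := PySem.List.sorted coin_vals (fun x => x) true with hvals
    set n := num_child
    set m := max_each
    have hfd : PySem.Int.floordiv n m = n / m := PySem.Int.floordiv_eq_ediv_of_pos (by omega)
    have hmd : PySem.Int.mod n m = n % m := PySem.Int.mod_eq_emod_of_pos (by omega)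
    have hdiv0 : 0 ≤ n / m := Int.ediv_nonneg (by omega) (by omega)
    have hmod0 : 0 ≤ n % m := Int.emod_nonneg n (by omega)
    have hmodm : n % m < m := Int.emod_lt_of_pos n (by omega)
    have hde : m * (n / m) + n % m = n := Int.mul_ediv_add_emod n m
    have hde2 : n / m * m = m * (n / m) := mul_comm _ _
    have hqle : n / m ≤ n := Int.ediv_le_self m (by omega)
    have houter : maxSpendOuter vals m n (n.toNat + 1) 0 0 0
        = pvG vals m n (n.toNat + 1) 0 0 := by
      rw [outer_eq vals m n hm (n.toNat + 1) 0 0 0 (by push_cast; omega)]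
      ring
    have hqnat : (((n / m).toNat : Nat) : Int) = n / m := by omega
    have hclosed : pvG vals m n (n.toNat + 1) 0 0
        = m * pvS vals 0 (n / m).toNat + (n % m) * ((PySem.List.pyGet? vals (n / m)).getD 0) := by
      rw [pvG_closed vals m n hm (n / m).toNat (n.toNat + 1) 0 0 (n % m)
        (by rw [hqnat]; omega) hmod0 hmodm (by omega)]
      rw [hqnat]
      simp
    have hS : pvS vals 0 (n / m).toNat = (vals.take (n / m).toNat).sum := by
      have := pvS_eq_sum_take (n / m).toNat vals 0
      simpa using this
    have hslice : PySem.List.slice vals none (some (PySem.Int.floordiv n m))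
        = vals.take (n / m).toNat := by
      rw [hfd, PySem.List.slice_to vals (by omega)]
    rw [houter, hclosed, hS, hmd, ← hslice, hfd]
    by_cases hr : n % m = 0
    · rw [if_neg (by simp [hr])]
      rw [hr]; ring
    · rw [if_pos hr]
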